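-- pv_equiv track=rewrite | github.com/resper1965/Gabi | scripts/test_cvm_search.py | search_chunks
-- ===== SOURCE A (Python) =====
-- def search_chunks(query: str, chunks: list, top_k=2):
--     """Extremely basic string matching for demonstration purposes."""
--     query_terms = set(query.lower().split())
--
--     scored_chunks = []
--     for chunk in chunks:
--         text = chunk.get("texto_integral", "").lower()
--         score = sum(1 for term in query_terms if term in text)
--         if score > 0:
--             scored_chunks.append((score, chunk))
--
--     # Sort by score descending
--     scored_chunks.sort(key=lambda x: x[0], reverse=True)
--     return [c[1] for c in scored_chunks[:top_k]]
-- ===== SOURCE B (Python) =====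
-- def search_chunks(query: str, chunks: list, top_k=2):
--     """Sort-free selection: score every chunk once, then sweep scores from the
--     highest possible value down to 1, collecting chunks in original order."""
--     query_terms = set(query.lower().split())
--     scores = [sum(1 for term in query_terms
--                   if term in chunk.get("texto_integral", "").lower())
--               for chunk in chunks]
--     result = []
--     for s in range(len(query_terms), 0, -1):
--         result += [c for c, sc in zip(chunks, scores) if sc == s]
--     return result[:top_k]
-- ===== Notes on version B (the rewrite author's own statement) =====
-- stated objective: alternative
-- what changed: Replaces the append-accumulate-then-stable-sort pipeline by a sort-free selection: scores are computed once into a parallel list, then a descending sweep over the possible scores (len(query_terms) down to 1) collects, per score, the matching chunks in original order via zip/filter.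
import Mathlib
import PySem

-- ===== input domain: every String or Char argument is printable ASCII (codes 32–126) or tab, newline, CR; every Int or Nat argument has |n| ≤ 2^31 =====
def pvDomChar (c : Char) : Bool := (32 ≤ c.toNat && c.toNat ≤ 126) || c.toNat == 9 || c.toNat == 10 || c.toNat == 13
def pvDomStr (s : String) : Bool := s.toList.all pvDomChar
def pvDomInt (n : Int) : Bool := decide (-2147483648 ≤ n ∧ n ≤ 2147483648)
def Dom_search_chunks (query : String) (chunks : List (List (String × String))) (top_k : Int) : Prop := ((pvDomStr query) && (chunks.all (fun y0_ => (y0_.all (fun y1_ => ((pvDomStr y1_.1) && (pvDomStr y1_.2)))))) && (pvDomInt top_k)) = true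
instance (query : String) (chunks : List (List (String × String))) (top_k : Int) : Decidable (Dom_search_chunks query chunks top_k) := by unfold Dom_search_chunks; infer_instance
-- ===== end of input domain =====

-- B drops A's stable comparison sort: it scores all chunks into a parallel list once, then
-- sweeps the possible scores from the maximum down to 1, collecting matching chunks in
-- original order (same output, alternative sort-free algorithm).


-- ===== PORT A =====
def search_chunks (query : String) (chunks : List (List (String × String))) (top_k : Int) : List (List (String × String)) :=
  let query_terms : PySem.Set String := PySem.Set.ofList (PySem.Str.split₀ (PySem.Str.lower query))
  -- for chunk in chunks: … if score > 0: scored_chunks.append((score, chunk))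
  let scored_chunks : List (Int × List (String × String)) :=
    chunks.foldl (fun acc chunk =>
      let text := PySem.Str.lower ((PySem.Dict.mk chunk).getD "texto_integral" "")
      let score : Int := (query_terms.countP (fun term => PySem.Str.isIn term text) : Int)
      if 0 < score then acc ++ [(score, chunk)] else acc) []
  -- scored_chunks.sort(key=lambda x: x[0], reverse=True); return [c[1] for c in scored_chunks[:top_k]]
  let sortedL := PySem.List.sorted scored_chunks (fun x => x.1) true
  (PySem.List.slice sortedL none (some top_k)).map (fun c => c.2)

-- ===== PORT B =====
def search_chunks_alt (query : String) (chunks : List (List (String × String))) (top_k : Int) : List (List (String × String)) :=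
  let query_terms : PySem.Set String := PySem.Set.ofList (PySem.Str.split₀ (PySem.Str.lower query))
  -- scores = [sum(1 for term in query_terms if term in chunk.get("texto_integral","").lower()) for chunk in chunks]
  let scores : List Int := chunks.map (fun chunk =>
    (query_terms.countP (fun term =>
      PySem.Str.isIn term (PySem.Str.lower ((PySem.Dict.mk chunk).getD "texto_integral" ""))) : Int))
  -- for s in range(len(query_terms), 0, -1): result += [c for c, sc in zip(chunks, scores) if sc == s]
  let result : List (List (String × String)) :=
    (PySem.List.pyRange (PySem.Set.len query_terms) 0 (-1)).foldl
      (fun r s => r ++ ((chunks.zip scores).filter (fun p => p.2 == s)).map Prod.fst) []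
  PySem.List.slice result none (some top_k)

-- ===== PRECONDITION & SPEC =====
def Spec_search_chunks (query : String) (chunks : List (List (String × String))) (top_k : Int) (out : List (List (String × String))) : Prop := out = search_chunks_alt query chunks top_k
instance (query : String) (chunks : List (List (String × String))) (top_k : Int) (out : List (List (String × String))) : Decidable (Spec_search_chunks query chunks top_k out) := by unfold Spec_search_chunks; infer_instance

-- ===== CLAIM (what is proved, stated in full; the proofs are below) =====
def Claim_equal_search_chunks : Prop := ∀ (query : String) (chunks : List (List (String × String))) (top_k : Int), Dom_search_chunks query chunks top_k → Spec_search_chunks query chunks top_k (search_chunks query chunks top_k)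

-- ===== LEMMAS AND PROOFS =====

-- descending concatenation of score buckets: filter (= j) ++ filter (= j-1) ++ … ++ filter (= 1)
def descConcat {C : Type} : Nat → List (Int × C) → List (Int × C)
  | 0, _ => []
  | j + 1, xs => xs.filter (fun q => q.1 == ((j : Int) + 1)) ++ descConcat j xs

theorem mem_descConcat {C : Type} (j : Nat) (xs : List (Int × C)) (q : Int × C)
    (h : q ∈ descConcat j xs) : q ∈ xs ∧ 1 ≤ q.1 ∧ q.1 ≤ (j : Int) := by
  induction j with
  | zero => simp [descConcat] at h
  | succ j ih =>
    simp only [descConcat, List.mem_append] at h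
    rcases h with h | h
    · rcases List.mem_filter.mp h with ⟨hmem, hq⟩
      have : q.1 = (j : Int) + 1 := by exact_mod_cast eq_of_beq hq
      refine ⟨hmem, by omega, by push_cast; omega⟩
    · rcases ih h with ⟨h1, h2, h3⟩
      exact ⟨h1, h2, by push_cast; omega⟩

theorem descConcat_append_high {C : Type} (j : Nat) (pre : List (Int × C)) (x : Int × C)
    (h : (j : Int) < x.1) : descConcat j (pre ++ [x]) = descConcat j pre := by
  induction j with
  | zero => simp [descConcat]
  | succ j ih =>
    have hx : (x.1 == ((j : Int) + 1)) = false := by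
      simp only [beq_eq_false_iff_ne]; push_cast at h ⊢; omega
    simp only [descConcat, List.filter_append, List.filter_cons, hx, List.filter_nil,
      Bool.false_eq_true, if_false, List.append_nil, ih (by push_cast at h ⊢; omega)]

theorem insertBy_append_left {C : Type} (b : C → C → Bool) (x : C) (L R : List C)
    (h : ∀ y ∈ L, b x y = false) :
    PySem.List.insertBy b x (L ++ R) = L ++ PySem.List.insertBy b x R := by
  induction L with
  | nil => simp
  | cons y ys ih =>
    simp only [List.cons_append, PySem.List.insertBy, h y (by simp), Bool.false_eq_true,
      if_false, ih (fun z hz => h z (by simp [hz]))]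

theorem insertBy_head_true {C : Type} (b : C → C → Bool) (x : C) (R : List C)
    (h : ∀ hd, R.head? = some hd → b x hd = true) :
    PySem.List.insertBy b x R = x :: R := by
  cases R with
  | nil => rfl
  | cons y ys => simp [PySem.List.insertBy, h y rfl]

theorem insert_desc {C : Type} (j : Nat) (x : Int × C) (pre : List (Int × C))
    (h1 : 1 ≤ x.1) (h2 : x.1 ≤ (j : Int)) :
    PySem.List.insertBy (fun a c => decide (c.1 < a.1)) x (descConcat j pre)
      = descConcat j (pre ++ [x]) := by
  induction j with
  | zero => exact absurd (h1.trans h2) (by norm_num)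
  | succ j ih =>
    by_cases hk : x.1 = (j : Int) + 1
    · -- x joins the end of bucket j+1
      have hL : ∀ y ∈ pre.filter (fun q => q.1 == ((j : Int) + 1)),
          (decide (y.1 < x.1)) = false := by
        intro y hy
        have : y.1 = (j : Int) + 1 := by exact_mod_cast eq_of_beq (List.mem_filter.mp hy).2
        simp [this, hk]
      have hR : ∀ hd, (descConcat j pre).head? = some hd → (decide (hd.1 < x.1)) = true := by
        intro hd hhd
        have := (mem_descConcat j pre hd (List.mem_of_mem_head? hhd)).2.2
        simp only [decide_eq_true_eq]; omega
      have hxk : (x.1 == ((j : Int) + 1)) = true := by simp [hk]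
      rw [descConcat, insertBy_append_left (fun a c => decide (c.1 < a.1)) x _ _ hL,
        insertBy_head_true (fun a c => decide (c.1 < a.1)) x _ hR, descConcat]
      simp only [List.filter_append, List.filter_cons, hxk, List.filter_nil,
        descConcat_append_high j pre x (by omega)]
      simp
    · -- x belongs to a lower bucket: pass through bucket j+1
      have hx' : x.1 ≤ (j : Int) := by push_cast at h2 ⊢; omega
      have hL : ∀ y ∈ pre.filter (fun q => q.1 == ((j : Int) + 1)),
          (decide (y.1 < x.1)) = false := by
        intro y hy
        have : y.1 = (j : Int) + 1 := by exact_mod_cast eq_of_beq (List.mem_filter.mp hy).2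
        simp only [this, decide_eq_false_iff_not]; omega
      have hxk : (x.1 == ((j : Int) + 1)) = false := by simp [hk]
      rw [descConcat, insertBy_append_left (fun a c => decide (c.1 < a.1)) x _ _ hL, ih hx',
        descConcat]
      simp only [List.filter_append, List.filter_cons, hxk, Bool.false_eq_true, if_false,
        List.filter_nil, List.append_nil]

theorem foldl_insert_desc {C : Type} (m : Nat) (xs pre : List (Int × C))
    (h : ∀ q ∈ xs, 1 ≤ q.1 ∧ q.1 ≤ (m : Int)) :
    xs.foldl (fun acc x => PySem.List.insertBy (fun a c => decide (c.1 < a.1)) x acc)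
        (descConcat m pre)
      = descConcat m (pre ++ xs) := by
  induction xs generalizing pre with
  | nil => simp
  | cons x xs ih =>
    have hx := h x (by simp)
    simp only [List.foldl_cons, insert_desc m x pre hx.1 hx.2]
    rw [ih (pre ++ [x]) (fun q hq => h q (by simp [hq]))]
    simp

theorem descConcat_nil {C : Type} (m : Nat) : descConcat (C := C) m [] = [] := by
  induction m with
  | zero => rfl
  | succ m ih => simp [descConcat, ih]

theorem sorted_eq_descConcat {C : Type} (m : Nat) (xs : List (Int × C))
    (h : ∀ q ∈ xs, 1 ≤ q.1 ∧ q.1 ≤ (m : Int)) :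
    PySem.List.sorted xs (fun q => q.1) true = descConcat m xs := by
  have h0 := foldl_insert_desc m xs [] h
  rw [descConcat_nil] at h0
  simpa [PySem.List.sorted] using h0

theorem map_slice_to {α β : Type} (f : α → β) (xs : List α) (b : Int) :
    (PySem.List.slice xs none (some b)).map f = PySem.List.slice (xs.map f) none (some b) := by
  simp [PySem.List.slice, List.map_take]

-- B's per-score bucket over the (chunk, score) pairs is the second projection of A's bucket
theorem bucket_eq {C : Type} (sc : C → Int) (chunks : List C) (s : Int) (hs : 0 < s) :
    ((chunks.map (fun c => (c, sc c))).filter (fun p => p.2 == s)).map Prod.fst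
      = (((chunks.filter (fun c => decide (0 < sc c))).map (fun c => (sc c, c))).filter
          (fun q => q.1 == s)).map (fun q => q.2) := by
  simp only [List.filter_map, List.map_map, List.filter_filter]
  congr 1
  apply List.filter_congr
  intro c _
  simp only [Function.comp]
  by_cases h : sc c = s
  · simp [h, hs]
  · simp [h]

-- the descending score sweep assembles exactly descConcat's second projections
theorem sweep_eq_descConcat {C : Type} (sc : C → Int) (chunks : List C) (m : Nat) :
    (PySem.List.pyRange (m : Int) 0 (-1)).flatMap
        (fun s => (((chunks.filter (fun c => decide (0 < sc c))).map (fun c => (sc c, c))).filter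
          (fun q => q.1 == s)).map (fun q => q.2))
      = (descConcat m ((chunks.filter (fun c => decide (0 < sc c))).map (fun c => (sc c, c)))).map
          (fun q => q.2) := by
  induction m with
  | zero => simp [PySem.List.pyRange_neg_one_eq_nil (by omega : (0:Int) ≤ 0), descConcat]
  | succ m ih =>
    rw [show ((m + 1 : Nat) : Int) = (m : Int) + 1 by push_cast; ring,
      PySem.List.pyRange_neg_one_cons (by omega), List.flatMap_cons,
      show (m : Int) + 1 - 1 = (m : Int) by ring, ih, descConcat, List.map_append]

-- A's pipeline equals B's pipeline, for an arbitrary scoring function bounded by m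
theorem core_eq {C : Type} (sc : C → Int) (m : Nat)
    (hb : ∀ c, sc c ≤ (m : Int))
    (hpos : ∀ c, 0 < sc c → 1 ≤ sc c)
    (chunks : List C) (top_k : Int) :
    (PySem.List.slice
        (PySem.List.sorted
          (chunks.foldl (fun acc chunk =>
            if 0 < sc chunk then acc ++ [(sc chunk, chunk)] else acc) [])
          (fun x => x.1) true)
        none (some top_k)).map (fun c => c.2)
      = PySem.List.slice
          ((PySem.List.pyRange (m : Int) 0 (-1)).foldl
            (fun r s => r ++ ((chunks.zip (chunks.map sc)).filter (fun p => p.2 == s)).map Prod.fst)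
            []) none (some top_k) := by
  have hA : chunks.foldl (fun acc chunk =>
        if 0 < sc chunk then acc ++ [(sc chunk, chunk)] else acc) []
      = (chunks.filter (fun c => decide (0 < sc c))).map (fun c => (sc c, c)) := by
    simpa using PySem.List.foldl_append_ite (fun c => 0 < sc c) (fun c => (sc c, c)) chunks []
  have hzip : chunks.zip (chunks.map sc) = chunks.map (fun c => (c, sc c)) := by
    rw [show chunks.zip (chunks.map sc) = (chunks.map id).zip (chunks.map sc) by rw [List.map_id],
      List.zip_map']
    simp
  have hB : (PySem.List.pyRange (m : Int) 0 (-1)).foldl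
        (fun r s => r ++ ((chunks.zip (chunks.map sc)).filter (fun p => p.2 == s)).map Prod.fst) []
      = (PySem.List.pyRange (m : Int) 0 (-1)).flatMap
          (fun s => ((chunks.map (fun c => (c, sc c))).filter (fun p => p.2 == s)).map Prod.fst) := by
    rw [hzip]
    simpa using PySem.List.foldl_append_eq_flatMap
      (fun s => ((chunks.map (fun c => (c, sc c))).filter (fun p => p.2 == s)).map Prod.fst)
      (PySem.List.pyRange (m : Int) 0 (-1)) []
  have hbounds : ∀ q ∈ (chunks.filter (fun c => decide (0 < sc c))).map (fun c => (sc c, c)),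
      1 ≤ q.1 ∧ q.1 ≤ (m : Int) := by
    intro q hq
    rcases List.mem_map.mp hq with ⟨c, hc, rfl⟩
    have := of_decide_eq_true (List.mem_filter.mp hc).2
    exact ⟨hpos c this, hb c⟩
  have hflat : (PySem.List.pyRange (m : Int) 0 (-1)).flatMap
        (fun s => ((chunks.map (fun c => (c, sc c))).filter (fun p => p.2 == s)).map Prod.fst)
      = (PySem.List.pyRange (m : Int) 0 (-1)).flatMap
          (fun s => (((chunks.filter (fun c => decide (0 < sc c))).map (fun c => (sc c, c))).filter
            (fun q => q.1 == s)).map (fun q => q.2)) := by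
    apply List.flatMap_congr
    intro s hs
    have hs' : 0 < s := (PySem.List.mem_pyRange_neg_one.mp hs).1
    exact bucket_eq sc chunks s hs'
  rw [hA, sorted_eq_descConcat m _ hbounds, map_slice_to, hB, hflat, sweep_eq_descConcat]

-- ===== VERDICT (by name: the statement is the Claim_ definition above) =====
theorem search_chunks_spec : Claim_equal_search_chunks := by
  intro query chunks top_k _
  unfold Spec_search_chunks search_chunks search_chunks_alt
  simp only [PySem.Set.len]
  exact core_eq
    (fun chunk => ((PySem.Set.ofList (PySem.Str.split₀ (PySem.Str.lower query))).countP
      (fun term => PySem.Str.isIn term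
        (PySem.Str.lower ((PySem.Dict.mk chunk).getD "texto_integral" ""))) : Int))
    (PySem.Set.ofList (PySem.Str.split₀ (PySem.Str.lower query))).length
    (fun c => Nat.cast_le.mpr List.countP_le_length)
    (fun c h => h)
    chunks top_k
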